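-- pv_equiv track=rewrite | github.com/HybridNeos/Graph-Mining-Project | graphCover.py | getUniqueMaximals
-- ===== SOURCE A (Python) =====
-- def setCheck(candidateEvents, uniqueMaximals):
--     # If something in uniqueMaximals is a supserset of candidatEvents we don't
--     #  candidatEvents
--     # If something in uniqueMaximals is a subset of candidatEvents we add
--     #   candidatEvents and remove it
--     supersets = set()
--     subsets = set()
--
--     for athlete, events in uniqueMaximals.items():
--         if events.issuperset(candidateEvents):
--             supersets.add(athlete)
--             break
--         # Since issuperset includes equality we know gives only proper supersets
--         elif events.issubset(candidateEvents):
--             subsets.add(athlete)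
--
--     return supersets, subsets
--
-- def getUniqueMaximals(subsets):
--     uniqueMaximals = {}
--     for athlete, events in subsets.items():
--         # people in uniqueMaximals who are subsets/supersets of events
--         supersets, subsets = setCheck(events, uniqueMaximals)
--         if not supersets:
--             uniqueMaximals[athlete] = events
--             # remove any subsets in uniqueMaximals from adding the new events
--             for noLongerMaximal in subsets:
--                 del uniqueMaximals[noLongerMaximal]
--
--     return uniqueMaximals
-- ===== SOURCE B (Python) =====
-- def getUniqueMaximals(subsets):
--     # Direct characterisation instead of A's incremental dict-with-deletions:
--     # keep an athlete iff no athlete anywhere has a proper superset of its events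
--     # and no earlier athlete has an equal event set.
--     allEvents = list(subsets.values())
--     result = []
--     seen = []
--     for athlete, events in subsets.items():
--         if events not in seen and not any(other > events for other in allEvents):
--             result.append((athlete, events))
--         seen.append(events)
--     return dict(result)
-- ===== Notes on version B (the rewrite author's own statement) =====
-- stated objective: simpler
-- what changed: Replaces A's incremental dict of current maximals (scan-with-break, conditional insert, deletion of dominated entries) by a direct one-pass characterisation: keep an athlete iff no athlete has a proper superset of its events and no earlier athlete has an equal set.
import Mathlib
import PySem

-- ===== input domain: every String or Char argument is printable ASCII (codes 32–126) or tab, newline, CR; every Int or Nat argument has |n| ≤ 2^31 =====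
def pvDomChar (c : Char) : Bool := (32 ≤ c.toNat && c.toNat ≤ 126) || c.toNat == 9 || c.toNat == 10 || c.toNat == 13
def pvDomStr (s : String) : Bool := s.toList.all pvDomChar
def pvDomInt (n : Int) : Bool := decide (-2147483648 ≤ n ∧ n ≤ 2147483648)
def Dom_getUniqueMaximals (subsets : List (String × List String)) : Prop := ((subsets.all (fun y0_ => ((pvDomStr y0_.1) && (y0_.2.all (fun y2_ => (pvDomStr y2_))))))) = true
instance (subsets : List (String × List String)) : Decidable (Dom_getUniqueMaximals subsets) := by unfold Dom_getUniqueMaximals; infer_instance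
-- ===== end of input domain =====

-- B replaces A's incremental dict of maximals (with deletions) by a direct one-pass
-- characterisation; objective: simpler. Equivalence of the RETURN value is proved on
-- association lists with distinct keys (the only lists that represent a dict argument).

-- ===== PORT A =====
-- the for-loop of setCheck (breaks on the first superset found)
def pvSetCheckLoop (cand : List String) (sup sub : PySem.Set String) :
    List (String × List String) → PySem.Set String × PySem.Set String
  | [] => (sup, sub)
  | (athlete, events) :: rest =>
    if PySem.Set.issuperset events cand then (PySem.Set.add sup athlete, sub)
    else if PySem.Set.issubset events cand then
      pvSetCheckLoop cand sup (PySem.Set.add sub athlete) rest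
    else pvSetCheckLoop cand sup sub rest

def pvSetCheck (candidateEvents : List String) (uniqueMaximals : PySem.Dict String (List String)) :
    PySem.Set String × PySem.Set String :=
  pvSetCheckLoop candidateEvents PySem.Set.empty PySem.Set.empty uniqueMaximals.items

-- the main for-loop of A; the deletion loop iterates the returned set 'subsets'
-- (erase is a key-filter, so the fold's result does not depend on that set's order)
def pvGumLoop : List (String × List String) → PySem.Dict String (List String) → PySem.Dict String (List String)
  | [], um => um
  | (athlete, events) :: rest, um =>
    let sc := pvSetCheck events um
    if sc.1.isEmpty then
      pvGumLoop rest (sc.2.foldl (fun d x => d.erase x) (um.insert athlete events))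
    else pvGumLoop rest um

def getUniqueMaximals (subsets : List (String × List String)) : List (String × List String) :=
  (pvGumLoop subsets PySem.Dict.empty).items

-- ===== PORT B =====
-- Python's 'other > events' on sets: proper superset
def pvProperSup (other events : List String) : Bool :=
  PySem.Set.issubset events other && !(PySem.Set.issubset other events)

-- the single for-loop of B, threading (result, seen)
def pvGumAltLoop (allEvents : List (List String)) :
    List (String × List String) → List (String × List String) → List (List String) →
    List (String × List String)
  | [], result, _ => result
  | (athlete, events) :: rest, result, seen =>
    if !(seen.any (fun o => PySem.Set.equal o events))
        && !(allEvents.any (fun o => pvProperSup o events)) then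
      pvGumAltLoop allEvents rest (result ++ [(athlete, events)]) (seen ++ [events])
    else
      pvGumAltLoop allEvents rest result (seen ++ [events])

def getUniqueMaximals_alt (subsets : List (String × List String)) : List (String × List String) :=
  pvGumAltLoop (subsets.map Prod.snd) subsets [] []

-- ===== PRECONDITION & SPEC =====
-- A's parameter is a Python dict, whose keys are necessarily distinct: an association
-- list with duplicate keys represents no actual input of A, so it is excluded.
def Pre_getUniqueMaximals (subsets : List (String × List String)) : Prop :=
  (subsets.map Prod.fst).Nodup
instance (subsets : List (String × List String)) : Decidable (Pre_getUniqueMaximals subsets) := by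
  unfold Pre_getUniqueMaximals; infer_instance

def pvWitness_getUniqueMaximals : (List (String × List String)) :=
  [("ann", ["run"]), ("bob", ["run", "swim"]), ("cat", ["golf"])]

def Spec_getUniqueMaximals (subsets : List (String × List String)) (out : List (String × List String)) : Prop := out = getUniqueMaximals_alt subsets
instance (subsets : List (String × List String)) (out : List (String × List String)) : Decidable (Spec_getUniqueMaximals subsets out) := by unfold Spec_getUniqueMaximals; infer_instance

-- ===== CLAIM (what is proved, stated in full; the proofs are below) =====
def Claim_equal_getUniqueMaximals : Prop := ∀ (subsets : List (String × List String)), Dom_getUniqueMaximals subsets → Pre_getUniqueMaximals subsets → Spec_getUniqueMaximals subsets (getUniqueMaximals subsets)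

-- ===== LEMMAS AND PROOFS =====

-- issubset as a boolean preorder
theorem pvSub_refl (x : List String) : PySem.Set.issubset x x = true := by
  rw [PySem.Set.issubset_iff]; exact fun s hs => hs

theorem pvSub_trans {x y z : List String} (h1 : PySem.Set.issubset x y = true)
    (h2 : PySem.Set.issubset y z = true) : PySem.Set.issubset x z = true := by
  rw [PySem.Set.issubset_iff] at *; exact fun s hs => h2 s (h1 s hs)

-- unpacking pvProperSup
theorem pvPS_split {o e : List String} (h : pvProperSup o e = true) :
    PySem.Set.issubset e o = true ∧ PySem.Set.issubset o e = false := by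
  simp only [pvProperSup, Bool.and_eq_true, Bool.not_eq_eq_eq_not, Bool.not_true] at h
  exact h

-- List.contains vs membership, through PySem.Set.contains
theorem pvContains_of_mem {xs : List String} {x : String} (h : x ∈ xs) :
    xs.contains x = true := by
  rw [← PySem.Set.contains_eq_listContains]
  exact (PySem.Set.contains_iff xs x).mpr h

theorem pvContains_of_not_mem {xs : List String} {x : String} (h : x ∉ xs) :
    xs.contains x = false := by
  rw [← PySem.Set.contains_eq_listContains]
  cases hc : PySem.Set.contains xs x
  · rfl
  · exact absurd ((PySem.Set.contains_iff xs x).mp hc) h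

theorem pvMem_of_contains {xs : List String} {x : String} (h : xs.contains x = true) :
    x ∈ xs := by
  rw [← PySem.Set.contains_eq_listContains] at h
  exact (PySem.Set.contains_iff xs x).mp h

-- B's loop: the result accumulator only grows at the end
theorem altLoop_res (A : List (List String)) (pend : List (String × List String)) :
    ∀ res seen, pvGumAltLoop A pend res seen = res ++ pvGumAltLoop A pend [] seen := by
  induction pend with
  | nil => intro res seen; simp [pvGumAltLoop]
  | cons p rest ih =>
    intro res seen
    obtain ⟨a, ev⟩ := p
    by_cases hc : (!(seen.any fun o => PySem.Set.equal o ev)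
        && !(A.any fun o => pvProperSup o ev)) = true
    · simp only [pvGumAltLoop, hc, if_true]
      rw [ih (res ++ [(a, ev)]), ih ([] ++ [(a, ev)])]
      simp [List.append_assoc]
    · simp only [pvGumAltLoop, hc, if_false]
      exact ih res _

-- B's loop: splitting the pending list
theorem altLoop_append (A : List (List String)) (xs ys : List (String × List String)) :
    ∀ res seen, pvGumAltLoop A (xs ++ ys) res seen
      = pvGumAltLoop A ys (pvGumAltLoop A xs res seen) (seen ++ xs.map Prod.snd) := by
  induction xs generalizing ys with
  | nil => intro res seen; simp [pvGumAltLoop]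
  | cons p rest ih =>
    intro res seen
    obtain ⟨a, ev⟩ := p
    by_cases hc : (!(seen.any fun o => PySem.Set.equal o ev)
        && !(A.any fun o => pvProperSup o ev)) = true
    · simp only [List.cons_append, pvGumAltLoop, hc, if_true]
      rw [ih ys (res ++ [(a, ev)]) (seen ++ [ev])]
      simp [List.append_assoc]
    · simp only [List.cons_append, pvGumAltLoop, hc, if_false]
      rw [ih ys res (seen ++ [ev])]
      simp [List.append_assoc]

-- B's loop: enlarging allEvents by one set filters the result
theorem altLoop_filter (A : List (List String)) (e : List String)
    (pend : List (String × List String)) :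
    ∀ seen, pvGumAltLoop (A ++ [e]) pend [] seen
      = (pvGumAltLoop A pend [] seen).filter (fun q => !(pvProperSup e q.2)) := by
  induction pend with
  | nil => intro seen; simp [pvGumAltLoop]
  | cons p rest ih =>
    intro seen
    obtain ⟨a, ev⟩ := p
    have hany : ((A ++ [e]).any fun o => pvProperSup o ev)
        = ((A.any fun o => pvProperSup o ev) || pvProperSup e ev) := by
      simp [List.any_append]
    by_cases hs : (seen.any fun o => PySem.Set.equal o ev) = true
    · simp only [pvGumAltLoop, hs, Bool.not_true, Bool.false_and, Bool.false_eq_true, if_false]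
      exact ih _
    · replace hs : (seen.any fun o => PySem.Set.equal o ev) = false := eq_false_of_ne_true hs
      by_cases ht : (A.any fun o => pvProperSup o ev) = true
      · simp only [pvGumAltLoop, hany, hs, ht, Bool.not_false, Bool.true_and,
          Bool.true_or, Bool.not_true, Bool.false_eq_true, if_false]
        exact ih _
      · replace ht : (A.any fun o => pvProperSup o ev) = false := eq_false_of_ne_true ht
        by_cases hu : pvProperSup e ev = true
        · simp only [pvGumAltLoop, hany, hs, ht, hu, Bool.not_false, Bool.true_and,
            Bool.false_or, Bool.not_true, Bool.false_eq_true, if_false, if_true,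
            List.nil_append]
          rw [altLoop_res A rest [(a, ev)], ih]
          simp [List.filter_cons, hu]
        · replace hu : pvProperSup e ev = false := eq_false_of_ne_true hu
          simp only [pvGumAltLoop, hany, hs, ht, hu, Bool.not_false, Bool.true_and,
            Bool.false_or, if_true, List.nil_append]
          rw [altLoop_res (A ++ [e]) rest [(a, ev)], altLoop_res A rest [(a, ev)], ih]
          simp [List.filter_cons, hu]

-- members of B's result come from the pending list and have no proper superset in allEvents
theorem altLoop_mem (A : List (List String)) (pend : List (String × List String)) :
    ∀ res seen q, q ∈ pvGumAltLoop A pend res seen →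
      q ∈ res ∨ (q ∈ pend ∧ A.any (fun o => pvProperSup o q.2) = false) := by
  induction pend with
  | nil => intro res seen q h; simp only [pvGumAltLoop] at h; exact Or.inl h
  | cons p rest ih =>
    intro res seen q h
    obtain ⟨a, ev⟩ := p
    by_cases hc : (!(seen.any fun o => PySem.Set.equal o ev)
        && !(A.any fun o => pvProperSup o ev)) = true
    · simp only [pvGumAltLoop, hc, if_true] at h
      rcases ih _ _ _ h with hr | hmok
      · rcases List.mem_append.mp hr with h1 | h2
        · exact Or.inl h1
        · have hq : q = (a, ev) := by simpa using h2
          subst hq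
          refine Or.inr ⟨List.mem_cons_self, ?_⟩
          have hc2 := hc
          rw [Bool.and_eq_true] at hc2
          have h3 := hc2.2
          simpa using h3
      · exact Or.inr ⟨List.mem_cons_of_mem _ hmok.1, hmok.2⟩
    · simp only [pvGumAltLoop, hc, if_false] at h
      rcases ih _ _ _ h with hr | hmok
      · exact Or.inl hr
      · exact Or.inr ⟨List.mem_cons_of_mem _ hmok.1, hmok.2⟩

theorem altLoop_sublist (A : List (List String)) (pend : List (String × List String)) :
    ∀ seen, (pvGumAltLoop A pend [] seen).Sublist pend := by
  induction pend with
  | nil => intro seen; simp [pvGumAltLoop]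
  | cons p rest ih =>
    intro seen
    obtain ⟨a, ev⟩ := p
    by_cases hc : (!(seen.any fun o => PySem.Set.equal o ev)
        && !(A.any fun o => pvProperSup o ev)) = true
    · simp only [pvGumAltLoop, hc, if_true]
      rw [altLoop_res]
      simpa using List.Sublist.cons₂ (a, ev) (ih _)
    · simp only [pvGumAltLoop, hc, if_false]
      exact List.Sublist.cons _ (ih _)

theorem alt_sublist (l : List (String × List String)) :
    (getUniqueMaximals_alt l).Sublist l := altLoop_sublist _ l []

theorem alt_mem_le (l : List (String × List String)) {q : String × List String}
    (hq : q ∈ getUniqueMaximals_alt l) :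
    q ∈ l ∧ (l.map Prod.snd).any (fun o => pvProperSup o q.2) = false := by
  have h := altLoop_mem (l.map Prod.snd) l [] [] q hq
  simpa using h

-- B on a snoc input
theorem alt_snoc (l : List (String × List String)) (a : String) (e : List String) :
    getUniqueMaximals_alt (l ++ [(a, e)])
      = (getUniqueMaximals_alt l).filter (fun q => !(pvProperSup e q.2))
        ++ (if (!((l.map Prod.snd).any (fun o => PySem.Set.equal o e))
               && !((l.map Prod.snd).any (fun o => pvProperSup o e))) = true
            then [(a, e)] else []) := by
  unfold getUniqueMaximals_alt
  rw [show (l ++ [(a, e)]).map Prod.snd = l.map Prod.snd ++ [e] by simp]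
  rw [altLoop_append _ l [(a, e)] [] []]
  rw [altLoop_filter]
  have hpp : pvProperSup e e = false := by
    simp [pvProperSup]
  simp only [pvGumAltLoop, List.nil_append, List.any_append, List.any_cons,
    List.any_nil, hpp, Bool.or_false]
  split <;> rename_i hsp <;> simp [hsp]

-- every input set is below some member of B's result
theorem alt_dominate (l : List (String × List String)) :
    ∀ q ∈ l, ∃ m ∈ getUniqueMaximals_alt l, PySem.Set.issubset q.2 m.2 = true := by
  induction l using List.reverseRecOn with
  | nil => intro q hq; simp at hq
  | append_singleton pre p ih =>
    obtain ⟨a, e⟩ := p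
    intro q hq
    rw [alt_snoc]
    by_cases hc : (!((pre.map Prod.snd).any fun o => PySem.Set.equal o e)
        && !((pre.map Prod.snd).any fun o => pvProperSup o e)) = true
    · rw [if_pos hc]
      rcases List.mem_append.mp hq with hq2 | hq2
      · obtain ⟨m, hm, hsub⟩ := ih q hq2
        by_cases hf : pvProperSup e m.2 = true
        · exact ⟨(a, e), by simp, pvSub_trans hsub (pvPS_split hf).1⟩
        · replace hf : pvProperSup e m.2 = false := eq_false_of_ne_true hf
          exact ⟨m, List.mem_append.mpr (Or.inl (List.mem_filter.mpr ⟨hm, by simp [hf]⟩)), hsub⟩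
      · have hq3 : q = (a, e) := by simpa using hq2
        subst hq3
        exact ⟨(a, e), by simp, pvSub_refl e⟩
    · rw [if_neg hc]; simp only [List.append_nil]
      have hex : ∃ q0 ∈ pre, PySem.Set.issubset e q0.2 = true := by
        have hor : ((pre.map Prod.snd).any fun o => PySem.Set.equal o e) = true
            ∨ ((pre.map Prod.snd).any fun o => pvProperSup o e) = true := by
          by_contra hno
          push_neg at hno
          apply hc
          have h1 := eq_false_of_ne_true hno.1
          have h2 := eq_false_of_ne_true hno.2
          simp [h1, h2]
        rcases hor with hs | ht
        · obtain ⟨o, ho, heq⟩ := List.any_eq_true.mp hs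
          obtain ⟨q0, hq0, ho2⟩ := List.mem_map.mp ho
          refine ⟨q0, hq0, ?_⟩
          rw [PySem.Set.issubset_iff]
          intro s hsmem
          rw [ho2]
          rw [PySem.Set.equal_iff] at heq
          exact (heq s).mpr hsmem
        · obtain ⟨o, ho, hps⟩ := List.any_eq_true.mp ht
          obtain ⟨q0, hq0, ho2⟩ := List.mem_map.mp ho
          refine ⟨q0, hq0, ?_⟩
          rw [ho2]
          exact (pvPS_split hps).1
      obtain ⟨q0, hq0, hsub0⟩ := hex
      obtain ⟨m0, hm0, hsubm⟩ := ih q0 hq0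
      have hem0 : PySem.Set.issubset e m0.2 = true := pvSub_trans hsub0 hsubm
      have hm0f : m0 ∈ (getUniqueMaximals_alt pre).filter (fun q => !(pvProperSup e q.2)) := by
        refine List.mem_filter.mpr ⟨hm0, ?_⟩
        simp [pvProperSup, hem0]
      rcases List.mem_append.mp hq with hq2 | hq2
      · obtain ⟨m2, hm2, hsub2⟩ := ih q hq2
        by_cases hf : pvProperSup e m2.2 = true
        · exact ⟨m0, hm0f, pvSub_trans hsub2 (pvSub_trans (pvPS_split hf).1 hem0)⟩
        · replace hf : pvProperSup e m2.2 = false := eq_false_of_ne_true hf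
          exact ⟨m2, List.mem_filter.mpr ⟨hm2, by simp [hf]⟩, hsub2⟩
      · have hq3 : q = (a, e) := by simpa using hq2
        subst hq3
        exact ⟨m0, hm0f, hem0⟩

-- A's setCheck loop when no superset is present: full scan, collects the subsets
theorem setCheckLoop_no_sup (cand : List String) :
    ∀ (items : List (String × List String)) (sub : List String),
      (∀ q ∈ items, PySem.Set.issubset cand q.2 = false) →
      (∀ q ∈ items, q.1 ∉ sub) → (items.map Prod.fst).Nodup →
      pvSetCheckLoop cand [] sub items
        = ([], sub ++ (items.filter (fun q => PySem.Set.issubset q.2 cand)).map Prod.fst) := by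
  intro items
  induction items with
  | nil => intro sub _ _ _; simp [pvSetCheckLoop]
  | cons p rest ih =>
    intro sub h1 h2 h3
    obtain ⟨a, ev⟩ := p
    have hsup : PySem.Set.issuperset ev cand = false := by
      simp only [PySem.Set.issuperset]
      exact h1 (a, ev) List.mem_cons_self
    have hnd2 := h3
    rw [List.map_cons, List.nodup_cons] at hnd2
    by_cases hsb : PySem.Set.issubset ev cand = true
    · simp only [pvSetCheckLoop, hsup, Bool.false_eq_true, if_false, hsb, if_true]
      have hadd : PySem.Set.add sub a = sub ++ [a] :=
        PySem.Set.add_of_not_mem (h2 (a, ev) List.mem_cons_self)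
      rw [hadd, ih (sub ++ [a])
        (fun q hq => h1 q (List.mem_cons_of_mem _ hq))
        (fun q hq => by
          intro hmem
          rcases List.mem_append.mp hmem with hmem2 | hmem2
          · exact h2 q (List.mem_cons_of_mem _ hq) hmem2
          · have hfa : q.1 = a := by simpa using hmem2
            have hqm : q.1 ∈ rest.map Prod.fst := List.mem_map_of_mem hq
            rw [hfa] at hqm
            exact hnd2.1 hqm)
        hnd2.2]
      simp [List.filter_cons, hsb, List.append_assoc]
    · replace hsb : PySem.Set.issubset ev cand = false := eq_false_of_ne_true hsb
      simp only [pvSetCheckLoop, hsup, Bool.false_eq_true, if_false, hsb]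
      rw [ih sub
        (fun q hq => h1 q (List.mem_cons_of_mem _ hq))
        (fun q hq => h2 q (List.mem_cons_of_mem _ hq))
        hnd2.2]
      simp [List.filter_cons, hsb]

-- A's setCheck loop when a superset is present: supersets comes back nonempty
theorem setCheckLoop_sup (cand : List String) :
    ∀ (items : List (String × List String)) (sub : List String),
      (∃ q ∈ items, PySem.Set.issubset cand q.2 = true) →
      (pvSetCheckLoop cand [] sub items).1.isEmpty = false := by
  intro items
  induction items with
  | nil => intro sub h; simp at h
  | cons p rest ih =>
    intro sub hex
    obtain ⟨a, ev⟩ := p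
    by_cases hsup : PySem.Set.issuperset ev cand = true
    · simp [pvSetCheckLoop, hsup, PySem.Set.add, PySem.Set.empty]
    · replace hsup : PySem.Set.issuperset ev cand = false := eq_false_of_ne_true hsup
      have hex2 : ∃ q ∈ rest, PySem.Set.issubset cand q.2 = true := by
        obtain ⟨q, hq, hsq⟩ := hex
        rcases List.mem_cons.mp hq with hq2 | hq2
        · exfalso
          subst hq2
          simp only [PySem.Set.issuperset] at hsup
          have hsq2 : PySem.Set.issubset cand ev = true := hsq
          rw [hsup] at hsq2
          exact Bool.noConfusion hsq2
        · exact ⟨q, hq2, hsq⟩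
      by_cases hsb : PySem.Set.issubset ev cand = true
      · simp only [pvSetCheckLoop, hsup, Bool.false_eq_true, if_false, hsb, if_true]
        exact ih _ hex2
      · replace hsb : PySem.Set.issubset ev cand = false := eq_false_of_ne_true hsb
        simp only [pvSetCheckLoop, hsup, Bool.false_eq_true, if_false, hsb]
        exact ih _ hex2

-- folding erase is a key filter
theorem foldl_erase_items (ns : List String) :
    ∀ d : PySem.Dict String (List String),
      (ns.foldl (fun d x => d.erase x) d).items
        = d.items.filter (fun p => !(ns.contains p.1)) := by
  induction ns with
  | nil => intro d; simp
  | cons n ns ih =>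
    intro d
    rw [List.foldl_cons, ih]
    simp only [PySem.Dict.erase, List.filter_filter]
    apply List.filter_congr
    intro p _
    simp only [List.contains_cons, Bool.not_or]
    rw [Bool.and_comm]

-- in a list with distinct keys, the key determines the pair
theorem key_inj {l : List (String × List String)} (h : (l.map Prod.fst).Nodup)
    {p q : String × List String} (hp : p ∈ l) (hq : q ∈ l) (he : p.1 = q.1) : p = q := by
  induction l with
  | nil => cases hp
  | cons x rest ih =>
    rw [List.map_cons, List.nodup_cons] at h
    rcases List.mem_cons.mp hp with hp2 | hp2 <;> rcases List.mem_cons.mp hq with hq2 | hq2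
    · rw [hp2, hq2]
    · exfalso
      apply h.1
      rw [hp2] at he
      exact he ▸ List.mem_map_of_mem hq2
    · exfalso
      apply h.1
      rw [hq2] at he
      exact he ▸ List.mem_map_of_mem hp2
    · exact ih h.2 hp2 hq2

-- the main invariant: A's loop started from B's result on the processed prefix
theorem main_inv :
    ∀ (pending pre : List (String × List String)),
      ((pre ++ pending).map Prod.fst).Nodup →
      pvGumLoop pending (PySem.Dict.mk (getUniqueMaximals_alt pre))
        = PySem.Dict.mk (getUniqueMaximals_alt (pre ++ pending)) := by
  intro pending
  induction pending with
  | nil => intro pre hnd; simp [pvGumLoop]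
  | cons p rest ih =>
    intro pre hnd
    obtain ⟨a, e⟩ := p
    have hselsub : (getUniqueMaximals_alt pre).Sublist pre := alt_sublist pre
    have hndpre : (pre.map Prod.fst).Nodup := by
      rw [List.map_append] at hnd
      exact (List.nodup_append.mp hnd).1
    have hndsel : ((getUniqueMaximals_alt pre).map Prod.fst).Nodup :=
      List.Nodup.sublist (List.Sublist.map Prod.fst hselsub) hndpre
    have hanot : a ∉ pre.map Prod.fst := by
      rw [List.map_append] at hnd
      have hd := List.disjoint_of_nodup_append hnd
      intro hmem
      exact hd hmem (by simp)
    have hanotsel : a ∉ (getUniqueMaximals_alt pre).map Prod.fst := fun hmem =>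
      hanot ((List.Sublist.map Prod.fst hselsub).subset hmem)
    by_cases hex : ∃ q ∈ pre, PySem.Set.issubset e q.2 = true
    · obtain ⟨q0, hq0, hs0⟩ := hex
      obtain ⟨m, hm, hsm⟩ := alt_dominate pre q0 hq0
      have hem : PySem.Set.issubset e m.2 = true := pvSub_trans hs0 hsm
      have hb : (pvSetCheck e (PySem.Dict.mk (getUniqueMaximals_alt pre))).1.isEmpty = false := by
        unfold pvSetCheck
        exact setCheckLoop_sup e _ _ ⟨m, hm, hem⟩
      simp only [pvGumLoop, hb, Bool.false_eq_true, if_false]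
      have hmpre : m.2 ∈ pre.map Prod.snd := List.mem_map_of_mem (hselsub.subset hm)
      have hnosup : ∀ q ∈ getUniqueMaximals_alt pre, pvProperSup e q.2 = false := by
        intro q hq
        cases hcon : pvProperSup e q.2
        · rfl
        · exfalso
          have h1 : PySem.Set.issubset q.2 e = true := (pvPS_split hcon).1
          have h2 : PySem.Set.issubset e q.2 = false := (pvPS_split hcon).2
          have hq2 := (alt_mem_le pre hq).2
          have hf := List.any_eq_false.mp hq2 m.2 hmpre
          apply hf
          have ha : PySem.Set.issubset q.2 m.2 = true := pvSub_trans h1 hem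
          have hb2 : PySem.Set.issubset m.2 q.2 = false := by
            cases hcc : PySem.Set.issubset m.2 q.2
            · rfl
            · exfalso
              have h3 := pvSub_trans hem hcc
              rw [h3] at h2
              exact Bool.noConfusion h2
          simp [pvProperSup, ha, hb2]
      have hsel_eq : getUniqueMaximals_alt (pre ++ [(a, e)]) = getUniqueMaximals_alt pre := by
        rw [alt_snoc]
        have hcond : (!((pre.map Prod.snd).any fun o => PySem.Set.equal o e)
            && !((pre.map Prod.snd).any fun o => pvProperSup o e)) = false := by
          by_cases hme : PySem.Set.issubset m.2 e = true
          · have heq : PySem.Set.equal m.2 e = true := by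
              rw [PySem.Set.equal_iff]
              intro x
              have hmeP := hme
              have hemP := hem
              rw [PySem.Set.issubset_iff] at hmeP hemP
              exact ⟨fun hx => hmeP x hx, fun hx => hemP x hx⟩
            have h4 : ((pre.map Prod.snd).any fun o => PySem.Set.equal o e) = true :=
              List.any_eq_true.mpr ⟨m.2, hmpre, heq⟩
            simp [h4]
          · replace hme : PySem.Set.issubset m.2 e = false := eq_false_of_ne_true hme
            have hps : pvProperSup m.2 e = true := by simp [pvProperSup, hem, hme]
            have h4 : ((pre.map Prod.snd).any fun o => pvProperSup o e) = true :=
              List.any_eq_true.mpr ⟨m.2, hmpre, hps⟩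
            simp [h4]
        rw [hcond]
        simp only [Bool.false_eq_true, if_false, List.append_nil]
        apply List.filter_eq_self.mpr
        intro q hq
        simp [hnosup q hq]
      have hgoal := ih (pre ++ [(a, e)]) (by simpa using hnd)
      rw [hsel_eq] at hgoal
      rw [hgoal]
      simp
    · have hall : ∀ q ∈ pre, PySem.Set.issubset e q.2 = false := by
        intro q hq
        cases hcon : PySem.Set.issubset e q.2
        · rfl
        · exact absurd ⟨q, hq, hcon⟩ hex
      have hallsel : ∀ q ∈ getUniqueMaximals_alt pre, PySem.Set.issubset e q.2 = false :=
        fun q hq => hall q (hselsub.subset hq)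
      have hsc : pvSetCheck e (PySem.Dict.mk (getUniqueMaximals_alt pre))
          = ([], ((getUniqueMaximals_alt pre).filter
              (fun q => PySem.Set.issubset q.2 e)).map Prod.fst) := by
        unfold pvSetCheck
        rw [show (PySem.Set.empty : PySem.Set String) = [] from rfl]
        rw [setCheckLoop_no_sup e (getUniqueMaximals_alt pre) [] hallsel
          (fun q _ => by simp) hndsel]
        simp
      simp only [pvGumLoop, hsc, List.isEmpty_nil, if_true]
      have hcont : (PySem.Dict.mk (getUniqueMaximals_alt pre)).contains a = false := by
        rw [PySem.Dict.contains_eq_decide_mem_keys]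
        simp only [PySem.Dict.keys_mk, decide_eq_false_iff_not]
        exact hanotsel
      have hins : ((PySem.Dict.mk (getUniqueMaximals_alt pre)).insert a e).items
          = getUniqueMaximals_alt pre ++ [(a, e)] :=
        PySem.Dict.items_insert_of_not_contains _ _ hcont
      have hsnoc : getUniqueMaximals_alt (pre ++ [(a, e)])
          = (getUniqueMaximals_alt pre).filter (fun q => !(pvProperSup e q.2)) ++ [(a, e)] := by
        rw [alt_snoc]
        have hs : ((pre.map Prod.snd).any fun o => PySem.Set.equal o e) = false := by
          apply List.any_eq_false.mpr
          intro o ho hcc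
          obtain ⟨q0, hq0, ho2⟩ := List.mem_map.mp ho
          have h5 : PySem.Set.issubset e o = true := by
            rw [PySem.Set.issubset_iff]
            intro x hx
            rw [PySem.Set.equal_iff] at hcc
            exact (hcc x).mpr hx
          rw [← ho2] at h5
          rw [hall q0 hq0] at h5
          exact Bool.noConfusion h5
        have ht : ((pre.map Prod.snd).any fun o => pvProperSup o e) = false := by
          apply List.any_eq_false.mpr
          intro o ho hcc
          obtain ⟨q0, hq0, ho2⟩ := List.mem_map.mp ho
          have h5 : PySem.Set.issubset e o = true := (pvPS_split hcc).1
          rw [← ho2] at h5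
          rw [hall q0 hq0] at h5
          exact Bool.noConfusion h5
        rw [hs, ht]
        simp
      have hnomem : a ∉ ((getUniqueMaximals_alt pre).filter
          (fun q => PySem.Set.issubset q.2 e)).map Prod.fst := by
        intro hmem
        obtain ⟨q2, hq2, hfst⟩ := List.mem_map.mp hmem
        exact hanotsel (hfst ▸ List.mem_map_of_mem (List.mem_filter.mp hq2).1)
      have hfe : (getUniqueMaximals_alt pre ++ [(a, e)]).filter
            (fun p => !((((getUniqueMaximals_alt pre).filter
              (fun q => PySem.Set.issubset q.2 e)).map Prod.fst).contains p.1))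
          = (getUniqueMaximals_alt pre).filter (fun q => !(pvProperSup e q.2)) ++ [(a, e)] := by
        rw [List.filter_append]
        congr 1
        · apply List.filter_congr
          intro q hq
          have h1 : pvProperSup e q.2 = PySem.Set.issubset q.2 e := by
            simp [pvProperSup, hallsel q hq]
          have h2 : (((getUniqueMaximals_alt pre).filter
              (fun q => PySem.Set.issubset q.2 e)).map Prod.fst).contains q.1
              = PySem.Set.issubset q.2 e := by
            cases hqe : PySem.Set.issubset q.2 e
            · cases hn : (((getUniqueMaximals_alt pre).filter
                  (fun q => PySem.Set.issubset q.2 e)).map Prod.fst).contains q.1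
              · rfl
              · exfalso
                have hmem := pvMem_of_contains hn
                obtain ⟨q2, hq2, hfst⟩ := List.mem_map.mp hmem
                have hq21 := List.mem_filter.mp hq2
                have heqq := key_inj hndsel hq21.1 hq hfst
                have hp2 : PySem.Set.issubset q2.2 e = true := hq21.2
                rw [heqq] at hp2
                rw [hp2] at hqe
                exact Bool.noConfusion hqe
            · exact pvContains_of_mem
                (List.mem_map_of_mem (List.mem_filter.mpr ⟨hq, hqe⟩))
          rw [h1, h2]
        · rw [List.filter_cons]
          rw [show ((a, e).1) = a from rfl]
          rw [pvContains_of_not_mem hnomem]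
          simp
      have hda : ((((getUniqueMaximals_alt pre).filter
              (fun q => PySem.Set.issubset q.2 e)).map Prod.fst).foldl (fun d x => d.erase x)
            ((PySem.Dict.mk (getUniqueMaximals_alt pre)).insert a e))
          = PySem.Dict.mk (getUniqueMaximals_alt (pre ++ [(a, e)])) := by
        apply PySem.Dict.ext
        rw [foldl_erase_items, hins, hfe, ← hsnoc]
      rw [hda]
      have hgoal := ih (pre ++ [(a, e)]) (by simpa using hnd)
      rw [hgoal]
      simp

-- ===== VERDICT (by name: the statement is the Claim_ definition above) =====
theorem getUniqueMaximals_spec : Claim_equal_getUniqueMaximals := by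
  intro subsets _ hpre
  unfold Spec_getUniqueMaximals getUniqueMaximals
  have h := main_inv subsets [] (by simpa using hpre)
  simp only [List.nil_append] at h
  have hd : PySem.Dict.empty = PySem.Dict.mk (getUniqueMaximals_alt ([] : List (String × List String))) := rfl
  rw [hd, h]
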